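-- pv_equiv track=rewrite | github.com/Mlio22/ytdown | YTDown/utils.py | customizemessage
-- ===== SOURCE A (Python) =====
-- def customizemessage(message):
--     text_length = [0, 0, 0, 0]
--     customized_message = ""
--
--     lines = message.split("\n")
--
--     for line in lines:
--         texts = line.split('|')
--         texts.pop()
--         for text_index, text in enumerate(texts):
--             if len(text) > text_length[text_index]:
--                 text_length[text_index] = len(text)
--
--     for line in lines:
--         texts = line.split('|')
--         texts.pop()
--
--         for text_index, text in enumerate(texts):
--             if text_index > 0:
--                 customized_message += "  "
--
--             if len(text) < text_length[text_index]:
--                 for _ in range(text_length[text_index] - len(text)):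
--                     text += ' '
--             customized_message += text
--             customized_message += "  |"
--         customized_message += '\n'
--
--     return customized_message
-- ===== SOURCE B (Python) =====
-- def customizemessage(message):
--     # Column-oriented: extract each of the 4 columns, pad each column to its own
--     # width, then stitch the rows back together by consuming the column fronts.
--     rows = [line.split('|')[:-1] for line in message.split('\n')]
--     cols = []
--     for i in range(4):
--         col = [row[i] for row in rows if len(row) > i]
--         w = max(map(len, col), default=0)
--         cols.append([t.ljust(w) + "  |" for t in col])
--     out = []
--     for row in rows:
--         cells = [cols[i].pop(0) for i in range(len(row))]
--         out.append("  ".join(cells) + "\n")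
--     return "".join(out)
-- ===== Notes on version B (the rewrite author's own statement) =====
-- stated objective: alternative
-- what changed: B works column-major instead of A's row-major two passes: it extracts each of the 4 columns from the parsed table, pads every column as a whole to its own max width, and then stitches the output rows back together by consuming the fronts of the padded columns, whereas A scans the lines twice maintaining a 4-slot width array and pads each cell in place while formatting.
import Mathlib
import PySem

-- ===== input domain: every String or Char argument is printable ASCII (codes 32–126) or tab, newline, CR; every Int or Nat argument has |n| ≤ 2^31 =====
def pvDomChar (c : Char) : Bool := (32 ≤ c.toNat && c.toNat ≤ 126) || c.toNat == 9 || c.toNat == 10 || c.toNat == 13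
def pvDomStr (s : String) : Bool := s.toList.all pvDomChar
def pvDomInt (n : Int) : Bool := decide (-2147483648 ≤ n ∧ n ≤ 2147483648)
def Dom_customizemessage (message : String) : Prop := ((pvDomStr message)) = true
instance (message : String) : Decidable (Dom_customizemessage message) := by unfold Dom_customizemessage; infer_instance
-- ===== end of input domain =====

-- B is column-oriented: it extracts each of the 4 columns, pads each whole column to its
-- width, then stitches the rows back by consuming the column fronts — a different
-- decomposition from A's row-major two passes over a 4-slot width array. Objective: alternative.

-- ===== PORT A =====
-- texts = line.split('|'); texts.pop()   (split never returns [], so pop() = dropLast)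
def aTexts (line : List Char) : List (List Char) :=
  (PySem.Chars.splitOn line ['|']).dropLast

-- first pass body: update text_length from one line
def aWidthLine (tl : List Int) (line : List Char) : List Int :=
  (PySem.List.enumerate (aTexts line)).foldl
    (fun tl p =>
      if PySem.Chars.len p.2 > PySem.List.pyGetD tl p.1 0 then
        PySem.List.pySetD tl p.1 (PySem.Chars.len p.2)
      else tl) tl

-- "for _ in range(k): text += ' '"
def aPad (t : List Char) (k : Int) : List Char :=
  (PySem.List.pyRange 0 k).foldl (fun t _ => t ++ [' ']) t

-- second pass body: append one formatted line to customized_message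
def aFmtLine (tl : List Int) (acc : List Char) (line : List Char) : List Char :=
  ((PySem.List.enumerate (aTexts line)).foldl
    (fun acc p =>
      let acc := if p.1 > 0 then acc ++ "  ".toList else acc
      let t := if PySem.Chars.len p.2 < PySem.List.pyGetD tl p.1 0 then
                 aPad p.2 (PySem.List.pyGetD tl p.1 0 - PySem.Chars.len p.2)
               else p.2
      acc ++ t ++ "  |".toList) acc) ++ ['\n']

def customizemessage (message : String) : String :=
  let lines := PySem.Chars.splitOn message.toList ['\n']
  let tl := lines.foldl aWidthLine [0, 0, 0, 0]
  String.mk (lines.foldl (aFmtLine tl) [])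

-- ===== PORT B =====
-- line.split('|')[:-1]
def bRow (line : List Char) : List (List Char) :=
  PySem.List.slice (PySem.Chars.splitOn line ['|']) none (some (-1))

-- col = [row[i] for row in rows if len(row) > i]   (the guard makes the index safe)
def bCol (rows : List (List (List Char))) (i : Nat) : List (List Char) :=
  (rows.filter (fun r => i < r.length)).map (fun r => r.getD i [])

-- w = max(map(len, col), default=0)
def bWidth (col : List (List Char)) : Nat :=
  (col.map List.length).foldl max 0

-- [t.ljust(w) + "  |" for t in col]
def bPadCol (rows : List (List (List Char))) (i : Nat) : List (List Char) :=
  (bCol rows i).map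
    (fun t => (t ++ List.replicate (bWidth (bCol rows i) - t.length) ' ') ++ "  |".toList)

-- the output loop: cells = [cols[i].pop(0) for i in range(len(row))]; inside Pre_ every
-- row has ≤ 4 cells, so getD/headD are exact for Python's cols[i] / pop(0)
def bStitch : List (List (List Char)) → List (List (List Char)) → List (List Char)
  | _, [] => []
  | cols, row :: rest =>
      let cells := (List.range row.length).map (fun i => (cols.getD i []).headD [])
      let cols' := cols.mapIdx (fun i c => if i < row.length then c.drop 1 else c)
      (PySem.Chars.join "  ".toList cells ++ ['\n']) :: bStitch cols' rest

def customizemessage_alt (message : String) : String :=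
  let rows := (PySem.Chars.splitOn message.toList ['\n']).map bRow
  let cols := (List.range 4).map (bPadCol rows)
  String.mk (bStitch cols rows).flatten

-- ===== PRECONDITION & SPEC =====
-- Pre_ excludes exactly the inputs on which A (and B alike) raises IndexError: a line
-- with more than 5 pipe-delimited fields (i.e. more than 4 '|') indexes past the fixed
-- 4-slot width list.
def Pre_customizemessage (message : String) : Prop :=
  ∀ l ∈ PySem.Chars.splitOn message.toList ['\n'],
    (PySem.Chars.splitOn l ['|']).length ≤ 5
instance (message : String) : Decidable (Pre_customizemessage message) := by
  unfold Pre_customizemessage; infer_instance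

def pvWitness_customizemessage : String := "ab|c|\nlonger|d|"

def Spec_customizemessage (message : String) (out : String) : Prop := out = customizemessage_alt message
instance (message : String) (out : String) : Decidable (Spec_customizemessage message out) := by unfold Spec_customizemessage; infer_instance

-- ===== CLAIM (what is proved, stated in full; the proofs are below) =====
def Claim_equal_customizemessage : Prop := ∀ (message : String), Dom_customizemessage message → Pre_customizemessage message → Spec_customizemessage message (customizemessage message)

-- ===== LEMMAS AND PROOFS =====
theorem bRow_eq_aTexts (line : List Char) : bRow line = aTexts line := by
  simp [bRow, aTexts, PySem.List.slice_to_neg_one]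

-- proof-side abbreviation: t.ljust(w) for an Int width
def pvLjust (t : List Char) (w : Int) : List Char :=
  t ++ List.replicate (w.toNat - t.length) ' '

-- writing back the value already stored is the identity
theorem setD_getD_self (tl : List Int) (i : Int) :
    PySem.List.pySetD tl i (PySem.List.pyGetD tl i 0) = tl := by
  simp only [PySem.List.pySetD, PySem.List.pySet?, PySem.List.pyGetD, PySem.List.pyGet?,
    PySem.List.pyIdx?]
  split_ifs with h1 h2 h3
  · have hl : i.toNat < tl.length := by omega
    simp [List.getElem?_eq_getElem hl, List.set_getElem_self]
  · simp
  · have hl : tl.length - (-i).toNat < tl.length := by omega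
    simp [List.getElem?_eq_getElem hl, List.set_getElem_self]
  · simp

-- one width-update step of A is a set-to-max step
theorem width_step (tl : List Int) (i : Int) (t : List Char) :
    (if PySem.Chars.len t > PySem.List.pyGetD tl i 0 then
      PySem.List.pySetD tl i (PySem.Chars.len t) else tl)
    = PySem.List.pySetD tl i (max (PySem.List.pyGetD tl i 0) (PySem.Chars.len t)) := by
  by_cases h : PySem.Chars.len t > PySem.List.pyGetD tl i 0
  · rw [if_pos h, max_eq_right (le_of_lt h)]
  · rw [if_neg h, max_eq_left (le_of_not_gt h), setD_getD_self]

-- what one line does to the 4-slot width list, entrywise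
def pvUpd (x : Int) (i : Nat) (row : List (List Char)) : Int :=
  if h : i < row.length then max x ((row[i].length : Int)) else x

theorem row_width (row : List (List Char)) (h : row.length ≤ 4) (a b c d : Int) :
    (PySem.List.enumerate row).foldl
      (fun tl p =>
        if PySem.Chars.len p.2 > PySem.List.pyGetD tl p.1 0 then
          PySem.List.pySetD tl p.1 (PySem.Chars.len p.2)
        else tl) [a, b, c, d]
    = [pvUpd a 0 row, pvUpd b 1 row, pvUpd c 2 row, pvUpd d 3 row] := by
  rw [PySem.List.foldl_congr_mem _ _
    (fun tl p => PySem.List.pySetD tl p.1 (max (PySem.List.pyGetD tl p.1 0) (PySem.Chars.len p.2)))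
    _ (fun tl p _ => width_step tl p.1 p.2)]
  match row, h with
  | [], _ => simp [PySem.List.enumerate, pvUpd]
  | [t0], _ => simp [PySem.List.enumerate, pvUpd, PySem.List.pySetD, PySem.List.pySet?, PySem.List.pyGetD, PySem.List.pyGet?, PySem.List.pyIdx?]
  | [t0, t1], _ => simp [PySem.List.enumerate, pvUpd, PySem.List.pySetD, PySem.List.pySet?, PySem.List.pyGetD, PySem.List.pyGet?, PySem.List.pyIdx?]
  | [t0, t1, t2], _ => simp [PySem.List.enumerate, pvUpd, PySem.List.pySetD, PySem.List.pySet?, PySem.List.pyGetD, PySem.List.pyGet?, PySem.List.pyIdx?]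
  | [t0, t1, t2, t3], _ => simp [PySem.List.enumerate, pvUpd, PySem.List.pySetD, PySem.List.pySet?, PySem.List.pyGetD, PySem.List.pyGet?, PySem.List.pyIdx?]

-- prepending one row to the table, columnwise
theorem bCol_cons (r : List (List Char)) (rows : List (List (List Char))) (i : Nat) :
    bCol (r :: rows) i = if h : i < r.length then r[i] :: bCol rows i else bCol rows i := by
  by_cases h : i < r.length
  · simp [bCol, h]
  · simp [bCol, h]

-- the Int-valued max-fold is the cast of the Nat-valued one
theorem castfold (ts : List (List Char)) (x : Nat) :
    (ts.map (fun t => ((t.length : Int)))).foldl max (x : Int)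
      = (((ts.map List.length).foldl max x : Nat) : Int) := by
  induction ts generalizing x with
  | nil => simp
  | cons t ts ih => simp only [List.map_cons, List.foldl_cons, ← Nat.cast_max, ih]

-- prepending one row, columnwise, on the running maximum
theorem mcol_cons (r : List (List Char)) (rows : List (List (List Char))) (i : Nat) (x : Int) :
    ((bCol (r :: rows) i).map (fun t => ((t.length : Int)))).foldl max x
      = ((bCol rows i).map (fun t => ((t.length : Int)))).foldl max (pvUpd x i r) := by
  rw [bCol_cons]; unfold pvUpd; split <;> simp

-- A's first pass computes, slot by slot, the max length of each column of the table
theorem widths_all (lines : List (List Char)) (h : ∀ l ∈ lines, (aTexts l).length ≤ 4)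
    (a b c d : Int) :
    lines.foldl aWidthLine [a, b, c, d]
      = [((bCol (lines.map bRow) 0).map (fun t => ((t.length : Int)))).foldl max a,
         ((bCol (lines.map bRow) 1).map (fun t => ((t.length : Int)))).foldl max b,
         ((bCol (lines.map bRow) 2).map (fun t => ((t.length : Int)))).foldl max c,
         ((bCol (lines.map bRow) 3).map (fun t => ((t.length : Int)))).foldl max d] := by
  induction lines generalizing a b c d with
  | nil => simp [bCol]
  | cons l ls ih =>
    have hl := h l (by simp)
    simp only [List.foldl_cons, List.map_cons]
    rw [show aWidthLine [a, b, c, d] l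
        = [pvUpd a 0 (aTexts l), pvUpd b 1 (aTexts l), pvUpd c 2 (aTexts l), pvUpd d 3 (aTexts l)]
      from row_width (aTexts l) hl a b c d]
    rw [ih (fun x hx => h x (by simp [hx]))]
    rw [bRow_eq_aTexts, mcol_cons, mcol_cons, mcol_cons, mcol_cons]

-- the blank-appending loop appends a block of blanks
theorem fold_space (l : List Int) (t : List Char) :
    l.foldl (fun t _ => t ++ [' ']) t = t ++ List.replicate l.length ' ' := by
  induction l generalizing t with
  | nil => simp
  | cons x l ih =>
    simp only [List.foldl_cons, ih, List.length_cons, List.append_assoc]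
    simp [List.replicate_succ]

-- the whole padding loop is ljust
theorem pad_eq (t : List Char) (w : Int) :
    (if PySem.Chars.len t < w then aPad t (w - PySem.Chars.len t) else t) = pvLjust t w := by
  by_cases h : PySem.Chars.len t < w
  · rw [if_pos h]
    unfold aPad pvLjust
    rw [fold_space]
    simp only [PySem.List.length_pyRange_one, sub_zero, PySem.Chars.len_eq] at *
    congr 2
    omega
  · rw [if_neg h]
    unfold pvLjust
    simp only [PySem.Chars.len_eq] at h
    have : w.toNat - t.length = 0 := by omega
    simp [this]

-- intercalate, unrolled one element
theorem inter_cons (sp a : List Char) (l : List (List Char)) :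
    sp.intercalate (a :: l) = a ++ l.flatMap (fun q => sp ++ q) := by
  induction l generalizing a with
  | nil => simp [List.intercalate]
  | cons b l ih =>
    rw [show sp.intercalate (a :: b :: l) = a ++ sp ++ sp.intercalate (b :: l) by
      simp [List.intercalate], ih b]
    simp

-- A's per-line format, as a pure function of the row
def pvRowA (tl : List Int) (xs : List (List Char)) : List Char :=
  PySem.Chars.join "  ".toList
    ((PySem.List.enumerate xs).map
      (fun p => pvLjust p.2 (PySem.List.pyGetD tl p.1 0) ++ "  |".toList)) ++ ['\n']

-- A's fold over the tail of an enumeration (all indices positive) flattens with the separator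
theorem fmt_tail (tl : List Int) (xs : List (List Char)) :
    ∀ (k : Int), 1 ≤ k → ∀ (acc : List Char),
    (PySem.List.enumerate xs k).foldl
      (fun acc p =>
        (if p.1 > 0 then acc ++ "  ".toList else acc) ++
          (if PySem.Chars.len p.2 < PySem.List.pyGetD tl p.1 0 then
            aPad p.2 (PySem.List.pyGetD tl p.1 0 - PySem.Chars.len p.2) else p.2) ++ "  |".toList)
      acc
    = acc ++ (PySem.List.enumerate xs k).flatMap
        (fun p => "  ".toList ++ (pvLjust p.2 (PySem.List.pyGetD tl p.1 0) ++ "  |".toList)) := by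
  induction xs with
  | nil => intro k hk acc; simp [PySem.List.enumerate]
  | cons x xs ih =>
    intro k hk acc
    simp only [PySem.List.enumerate, List.foldl_cons, List.flatMap_cons]
    rw [if_pos (by omega : k > 0), pad_eq, ih (k + 1) (by omega)]
    simp

-- A's per-line formatting fold builds exactly the joined row
theorem fmt_eq (tl : List Int) (acc line : List Char) :
    aFmtLine tl acc line = acc ++ pvRowA tl (aTexts line) := by
  unfold aFmtLine pvRowA PySem.Chars.join
  cases h : aTexts line with
  | nil => simp [PySem.List.enumerate, List.intercalate]
  | cons x xs =>
    simp only [PySem.List.enumerate, List.foldl_cons, List.map_cons]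
    rw [if_neg (by omega : ¬((0 : Int) > 0)), pad_eq, show (0:Int) + 1 = 1 from rfl,
      fmt_tail tl xs 1 (by omega),
      inter_cons, List.flatMap_map]
    simp

-- mapIdx over a map of range is a map of range
theorem mapIdx_map_range {α β : Type} (n : Nat) (h : Nat → α) (f : Nat → α → β) :
    ((List.range n).map h).mapIdx f = (List.range n).map (fun i => f i (h i)) := by
  apply List.ext_getElem
  · simp
  · intro i h1 h2
    simp

-- the stitch loop reconstructs each row from the transformed columns
theorem stitch_eq (g : Nat → List Char → List Char) (rows : List (List (List Char)))
    (h : ∀ r ∈ rows, r.length ≤ 4) :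
    bStitch ((List.range 4).map (fun i => (bCol rows i).map (g i))) rows
      = rows.map (fun row =>
          PySem.Chars.join "  ".toList
            ((List.range row.length).map (fun i => g i (row.getD i []))) ++ ['\n']) := by
  induction rows with
  | nil => simp [bStitch]
  | cons r rest ih =>
    have hr : r.length ≤ 4 := h r (by simp)
    simp only [bStitch, List.map_cons]
    congr 1
    · congr 1
      congr 1
      apply List.map_congr_left
      intro i hi
      have hi4 : i < 4 := by simp at hi; omega
      have : (((List.range 4).map (fun i => (bCol (r :: rest) i).map (g i))).getD i [])
          = (bCol (r :: rest) i).map (g i) := by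
        rw [List.getD_eq_getElem _ _ (by simpa using hi4)]
        simp
      rw [this, bCol_cons]
      have hir : i < r.length := by simpa using hi
      rw [dif_pos hir]
      simp [List.getD, List.getElem?_eq_getElem hir]
    · rw [mapIdx_map_range]
      have : ((List.range 4).map (fun i =>
          if i < r.length then ((bCol (r :: rest) i).map (g i)).drop 1
          else (bCol (r :: rest) i).map (g i)))
        = (List.range 4).map (fun i => (bCol rest i).map (g i)) := by
        apply List.map_congr_left
        intro i _
        rw [bCol_cons]
        by_cases hir : i < r.length
        · rw [dif_pos hir, if_pos hir]; simp
        · rw [dif_neg hir, if_neg hir]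
      rw [this, ih (fun x hx => h x (by simp [hx]))]

-- per row: A's format with the 4-slot Int width list is B's format with the Nat widths
theorem row_fmt (W : Nat → Nat) (xs : List (List Char)) (h : xs.length ≤ 4) :
    pvRowA [((W 0 : Int)), ((W 1 : Int)), ((W 2 : Int)), ((W 3 : Int))] xs
      = PySem.Chars.join "  ".toList
          ((List.range xs.length).map (fun i =>
            (xs.getD i [] ++ List.replicate (W i - (xs.getD i []).length) ' ') ++ "  |".toList))
          ++ ['\n'] := by
  unfold pvRowA
  congr 2
  match xs, h with
  | [], _ => simp [PySem.List.enumerate]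
  | [t0], _ => simp [PySem.List.enumerate, List.range_succ, pvLjust, PySem.List.pyGetD, PySem.List.pyGet?, PySem.List.pyIdx?]
  | [t0, t1], _ => simp [PySem.List.enumerate, List.range_succ, pvLjust, PySem.List.pyGetD, PySem.List.pyGet?, PySem.List.pyIdx?]
  | [t0, t1, t2], _ => simp [PySem.List.enumerate, List.range_succ, pvLjust, PySem.List.pyGetD, PySem.List.pyGet?, PySem.List.pyIdx?]
  | [t0, t1, t2, t3], _ => simp [PySem.List.enumerate, List.range_succ, pvLjust, PySem.List.pyGetD, PySem.List.pyGet?, PySem.List.pyIdx?]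

-- ===== VERDICT (by name: the statement is the Claim_ definition above) =====
theorem customizemessage_spec : Claim_equal_customizemessage := by
  unfold Claim_equal_customizemessage
  intro message _ hpre
  unfold Spec_customizemessage customizemessage customizemessage_alt
  dsimp only
  set lines := PySem.Chars.splitOn message.toList ['\n'] with hlines
  have hlen : ∀ l ∈ lines, (aTexts l).length ≤ 4 := by
    intro l hl
    have := hpre l hl
    simp only [aTexts, List.length_dropLast]
    omega
  set rows := lines.map bRow with hrows
  have hrlen : ∀ r ∈ rows, r.length ≤ 4 := by
    intro r hr
    rw [hrows] at hr
    obtain ⟨l, hl, rfl⟩ := List.mem_map.mp hr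
    rw [bRow_eq_aTexts]
    exact hlen l hl
  set W : Nat → Nat := fun i => bWidth (bCol rows i) with hW
  have htl : lines.foldl aWidthLine [0, 0, 0, 0]
      = [((W 0 : Int)), ((W 1 : Int)), ((W 2 : Int)), ((W 3 : Int))] := by
    rw [widths_all lines hlen 0 0 0 0]
    simp only [hW, bWidth, ← hrows]
    rw [show ((0:Int)) = ((0:Nat) : Int) by simp]
    rw [castfold, castfold, castfold, castfold]
  rw [htl]
  congr 1
  -- A side becomes a flatMap of per-row strings
  rw [PySem.List.foldl_congr_mem lines _ (fun acc line =>
        acc ++ pvRowA [((W 0 : Int)), ((W 1 : Int)), ((W 2 : Int)), ((W 3 : Int))] (aTexts line))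
        [] (fun acc x _ => fmt_eq _ acc x)]
  rw [PySem.List.foldl_append_eq_flatMap]
  -- B side: the stitch loop gives the same per-row strings
  have hcols : (List.range 4).map (bPadCol rows)
      = (List.range 4).map (fun i => (bCol rows i).map
          (fun t => (t ++ List.replicate (W i - t.length) ' ') ++ "  |".toList)) := rfl
  rw [hcols, stitch_eq _ rows hrlen]
  rw [List.flatten_eq_flatMap, List.flatMap_map, hrows, List.flatMap_map]
  simp only [List.nil_append]
  apply List.flatMap_congr
  intro l hl
  rw [bRow_eq_aTexts, row_fmt W (aTexts l) (hlen l hl)]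
  rfl
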